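-- pv_equiv track=rewrite | github.com/multiSnow/mcomix3 | mcomix/scrolling.py | _bresenham_sums
-- ===== SOURCE A (Python) =====
-- def _bresenham_sums(num, denom, half_up):
--     """ This algorithm is derived from Bresenham's line algorithm in
--     order to distribute the remainder of num/denom equally. See
--     https://en.wikipedia.org/wiki/Bresenham%27s_line_algorithm for details.
--     """
--     if num < 0:
--         raise ValueError("num < 0");
--     if denom < 1:
--         raise ValueError("denom < 1");
--     quotient = num // denom;
--     remainder = num % denom;
--     needs_up = half_up and (remainder != 0) and ((denom & 1) == 0)
--     up_flag = False
--     error = denom >> 1;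
--     result = [0]
--     partial_sum = 0
--     for i in range(denom):
--         error -= remainder
--         if error < 0:
--             error += denom
--             partial_sum += quotient + 1
--         else:
--             partial_sum += quotient
--
--         # round half up, if necessary
--         if up_flag:
--             partial_sum -= 1;
--             up_flag = False;
--         elif needs_up and error == 0:
--             partial_sum += 1;
--             up_flag = True;
--
--         result.append(partial_sum)
--     return result
-- ===== SOURCE B (Python) =====
-- def _bresenham_sums(num, denom, half_up):
--     """Closed-form version: each cumulative sum is computed directly by a
--     floor formula instead of threading Bresenham's error term through a loop."""
--     if num < 0:
--         raise ValueError("num < 0")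
--     if denom < 1:
--         raise ValueError("denom < 1")
--     quotient, remainder = divmod(num, denom)
--     half = denom >> 1
--     needs_up = half_up and remainder != 0 and denom % 2 == 0
--     return [quotient * k
--             + (remainder * k + denom - 1 - half) // denom
--             + (1 if needs_up and (remainder * k) % denom == half else 0)
--             for k in range(denom + 1)]
-- ===== Notes on version B (the rewrite author's own statement) =====
-- stated objective: simpler
-- what changed: Replaces A's stateful Bresenham loop (error term, up_flag, running partial sum, list append) by a single list comprehension that computes each cumulative sum independently with a closed-form floor formula plus a congruence test for the half-up event.
import Mathlib
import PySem

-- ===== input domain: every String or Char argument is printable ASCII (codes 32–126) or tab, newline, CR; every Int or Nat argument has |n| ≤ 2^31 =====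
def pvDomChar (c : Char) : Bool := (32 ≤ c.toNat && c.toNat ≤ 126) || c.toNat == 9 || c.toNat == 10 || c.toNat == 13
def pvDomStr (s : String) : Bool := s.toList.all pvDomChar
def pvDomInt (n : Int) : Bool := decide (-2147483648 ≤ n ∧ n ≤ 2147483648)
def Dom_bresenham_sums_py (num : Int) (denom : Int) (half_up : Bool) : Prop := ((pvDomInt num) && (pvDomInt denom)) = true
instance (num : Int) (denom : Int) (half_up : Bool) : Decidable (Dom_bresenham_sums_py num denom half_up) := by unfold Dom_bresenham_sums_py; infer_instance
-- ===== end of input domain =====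

-- B replaces A's stateful Bresenham error loop by a direct closed-form floor formula
-- evaluated independently at each index (objective: simpler).

-- ===== PORT A =====
-- loop body of A: state = (error, up_flag, partial_sum, result); the loop index i is unused in Python
def pvBodyA (quotient remainder denom : Int) (needs_up : Bool)
    (st : Int × Bool × Int × List Int) (_i : Int) : Int × Bool × Int × List Int :=
  let error := st.1 - remainder
  let upd := if error < 0 then (error + denom, st.2.2.1 + quotient + 1)
             else (error, st.2.2.1 + quotient)
  let fin := if st.2.1 then (upd.2 - 1, false)
             else if needs_up && (upd.1 == 0) then (upd.2 + 1, true)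
             else (upd.2, st.2.1)
  (upd.1, fin.2, fin.1, st.2.2.2 ++ [fin.1])

def bresenham_sums_py (num : Int) (denom : Int) (half_up : Bool) : List Int :=
  -- `num < 0` and `denom < 1` raise ValueError: excluded by Pre_
  let quotient := PySem.Int.floordiv num denom
  let remainder := PySem.Int.mod num denom
  let needs_up := half_up && !(remainder == 0) && (PySem.Int.band denom 1 == 0)
  let error := denom >>> (1 : Nat)   -- denom >> 1
  let st := (PySem.List.pyRange 0 denom 1).foldl
      (pvBodyA quotient remainder denom needs_up) (error, false, 0, [0])
  st.2.2.2

-- ===== PORT B =====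
def bresenham_sums_py_alt (num : Int) (denom : Int) (half_up : Bool) : List Int :=
  let quotient := PySem.Int.floordiv num denom
  let remainder := PySem.Int.mod num denom
  let half := denom >>> (1 : Nat)   -- denom >> 1
  let needs_up := half_up && !(remainder == 0) && (PySem.Int.mod denom 2 == 0)
  (PySem.List.pyRange 0 (denom + 1) 1).map (fun k =>
    quotient * k + PySem.Int.floordiv (remainder * k + denom - 1 - half) denom +
      (if needs_up && (PySem.Int.mod (remainder * k) denom == half) then 1 else 0))

-- ===== PRECONDITION & SPEC =====
-- Pre_ excludes exactly the inputs where A raises ValueError: num < 0 or denom < 1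
def Pre_bresenham_sums_py (num : Int) (denom : Int) (half_up : Bool) : Prop :=
  0 ≤ num ∧ 1 ≤ denom
instance (num : Int) (denom : Int) (half_up : Bool) : Decidable (Pre_bresenham_sums_py num denom half_up) := by
  unfold Pre_bresenham_sums_py; infer_instance
def pvWitness_bresenham_sums_py : Int × Int × Bool := (7, 4, true)

def Spec_bresenham_sums_py (num : Int) (denom : Int) (half_up : Bool) (out : List Int) : Prop := out = bresenham_sums_py_alt num denom half_up
instance (num : Int) (denom : Int) (half_up : Bool) (out : List Int) : Decidable (Spec_bresenham_sums_py num denom half_up out) := by unfold Spec_bresenham_sums_py; infer_instance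

-- ===== CLAIM (what is proved, stated in full; the proofs are below) =====
def Claim_equal_bresenham_sums_py : Prop := ∀ (num : Int) (denom : Int) (half_up : Bool), Dom_bresenham_sums_py num denom half_up → Pre_bresenham_sums_py num denom half_up → Spec_bresenham_sums_py num denom half_up (bresenham_sums_py num denom half_up)

-- ===== LEMMAS AND PROOFS =====

-- closed form for the k-th cumulative sum (the event condition in "error" form)
def pvF (q r d h : Int) (need : Bool) (k : Int) : Int :=
  q * k + (r * k + d - 1 - h) / d + (if need && ((h - r * k) % d == 0) then 1 else 0)

-- A's error term and its div counterpart, in closed form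
def pvE (r d h M : Int) : Int := (h - r * M) % d
def pvS (r d h M : Int) : Int := (h - r * M) / d

lemma pvEmodSmall (d x : Int) (_hd : 0 < d) (h1 : -d < x) (h2 : x < d) :
    x % d = if x < 0 then x + d else x := by
  split_ifs with hx
  · have h3 : x + d = x + d * 1 := by ring
    have h4 : (x + d) % d = x % d := by rw [h3, Int.add_mul_emod_self_left]
    rw [← h4, Int.emod_eq_of_lt (by omega) (by omega)]
  · exact Int.emod_eq_of_lt (by omega) h2

lemma pvEdiv (d x t : Int) (hd : 0 < d) (h1 : 0 ≤ x - d * t) (h2 : x - d * t < d) :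
    x / d = t := by
  have h3 : x = (x - d * t) + d * t := by ring
  rw [h3, Int.add_mul_ediv_left _ _ (ne_of_gt hd), Int.ediv_eq_zero_of_lt h1 h2, zero_add]

lemma pvES (r d h M : Int) : d * pvS r d h M + pvE r d h M = h - r * M :=
  Int.mul_ediv_add_emod _ _

lemma pvE_bounds (r d h M : Int) (hd : 0 < d) : 0 ≤ pvE r d h M ∧ pvE r d h M < d :=
  ⟨Int.emod_nonneg _ (ne_of_gt hd), Int.emod_lt_of_pos _ hd⟩

lemma pvE_succ (r d h M : Int) (hd : 0 < d) (hr0 : 0 ≤ r) (hrd : r < d) :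
    pvE r d h (M + 1) = if pvE r d h M - r < 0 then pvE r d h M - r + d
                        else pvE r d h M - r := by
  obtain ⟨he0, hed⟩ := pvE_bounds r d h M hd
  have h3 : h - r * (M + 1) = (pvE r d h M - r) + d * pvS r d h M := by
    linarith [pvES r d h M]
  show (h - r * (M + 1)) % d = _
  rw [h3, Int.add_mul_emod_self_left,
      pvEmodSmall d (pvE r d h M - r) hd (by omega) (by omega)]

lemma pvS_succ (r d h M : Int) (hd : 0 < d) (hr0 : 0 ≤ r) (hrd : r < d) :
    pvS r d h (M + 1) = if pvE r d h M - r < 0 then pvS r d h M - 1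
                        else pvS r d h M := by
  obtain ⟨he0, hed⟩ := pvE_bounds r d h M hd
  have hes := pvES r d h M
  show (h - r * (M + 1)) / d = _
  split_ifs with hc
  · have h4 : h - r * (M + 1) - d * (pvS r d h M - 1) = pvE r d h M - r + d := by
      linarith
    exact pvEdiv d _ _ hd (by rw [h4]; omega) (by rw [h4]; omega)
  · have h4 : h - r * (M + 1) - d * pvS r d h M = pvE r d h M - r := by linarith
    exact pvEdiv d _ _ hd (by rw [h4]; omega) (by rw [h4]; omega)

-- pvF in terms of pvE/pvS
lemma pvF_eq (q r d h : Int) (need : Bool) (M : Int) (hd : 0 < d) :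
    pvF q r d h need M
      = q * M + -(pvS r d h M) + (if need && (pvE r d h M == 0) then 1 else 0) := by
  obtain ⟨he0, hed⟩ := pvE_bounds r d h M hd
  have hes := pvES r d h M
  have h4 : r * M + d - 1 - h - d * (-(pvS r d h M)) = d - 1 - pvE r d h M := by
    linarith
  have hdiv : (r * M + d - 1 - h) / d = -(pvS r d h M) :=
    pvEdiv d _ _ hd (by rw [h4]; omega) (by rw [h4]; omega)
  unfold pvF
  rw [hdiv]
  rfl

-- one iteration of A's loop maps the closed-form state at M to the state at M+1
lemma pvStep (d r q h : Int) (need : Bool) (hd : 0 < d) (hr0 : 0 ≤ r) (hrd : r < d)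
    (hneed : need = true → d = 2 * h ∧ 0 < r) (M : Int) (L : List Int) (i : Int) :
    pvBodyA q r d need
      (pvE r d h M, need && (pvE r d h M == 0), pvF q r d h need M, L) i
    = (pvE r d h (M + 1), need && (pvE r d h (M + 1) == 0),
       pvF q r d h need (M + 1), L ++ [pvF q r d h need (M + 1)]) := by
  obtain ⟨he0, hed⟩ := pvE_bounds r d h M hd
  rw [pvF_eq q r d h need M hd, pvF_eq q r d h need (M + 1) hd,
      pvE_succ r d h M hd hr0 hrd, pvS_succ r d h M hd hr0 hrd]
  simp only [pvBodyA]
  by_cases hb : (need && (pvE r d h M == 0)) = true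
  · -- the half-up event fired at M: the flag is set and the error was 0
    obtain ⟨hn, hz⟩ := Bool.and_eq_true_iff.mp hb
    have hz0 : pvE r d h M = 0 := by simpa using hz
    obtain ⟨hdh, hrpos⟩ := hneed hn
    have hc : pvE r d h M - r < 0 := by omega
    have hnz : (pvE r d h M - r + d == 0) = false := by
      simp only [beq_eq_false_iff_ne]; omega
    simp only [if_pos hc, if_pos hb, hnz, Bool.and_false, Bool.false_eq_true, if_false,
      Prod.mk.injEq, List.append_right_inj, List.cons.injEq, and_true]
    and_intros <;> first | trivial | ring
  · -- no event at M: the flag is clear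
    have hbf : (need && (pvE r d h M == 0)) = false := by simpa using hb
    by_cases hc : pvE r d h M - r < 0
    · by_cases hz : (need && (pvE r d h M - r + d == 0)) = true
      · simp only [if_pos hc, if_neg hb, if_pos hz,
          Prod.mk.injEq, List.append_right_inj, List.cons.injEq, and_true]
        and_intros <;> first | trivial | (solve | simp [hz]) | ring
      · have hzf : (need && (pvE r d h M - r + d == 0)) = false := by simpa using hz
        simp only [if_pos hc, if_neg hb, if_neg hz,
          Prod.mk.injEq, List.append_right_inj, List.cons.injEq, and_true]
        and_intros <;> first | trivial | (solve | simp [hbf, hzf]) | ring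
    · by_cases hz : (need && (pvE r d h M - r == 0)) = true
      · simp only [if_neg hc, if_neg hb, if_pos hz,
          Prod.mk.injEq, List.append_right_inj, List.cons.injEq, and_true]
        and_intros <;> first | trivial | (solve | simp [hz]) | ring
      · have hzf : (need && (pvE r d h M - r == 0)) = false := by simpa using hz
        simp only [if_neg hc, if_neg hb, if_neg hz,
          Prod.mk.injEq, List.append_right_inj, List.cons.injEq, and_true]
        and_intros <;> first | trivial | (solve | simp [hbf, hzf]) | ring

-- the whole loop: folding A's body over any list advances the closed-form state by its length
lemma pvLoop (d r q h : Int) (need : Bool) (hd : 0 < d) (hr0 : 0 ≤ r) (hrd : r < d)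
    (hneed : need = true → d = 2 * h ∧ 0 < r) :
    ∀ (l : List Int) (m : Nat),
      l.foldl (pvBodyA q r d need)
        (pvE r d h (m : Int), need && (pvE r d h (m : Int) == 0),
         pvF q r d h need (m : Int),
         (List.range (m + 1)).map (fun k : Nat => pvF q r d h need (k : Int)))
      = (pvE r d h ((m + l.length : Nat) : Int),
         need && (pvE r d h ((m + l.length : Nat) : Int) == 0),
         pvF q r d h need ((m + l.length : Nat) : Int),
         (List.range (m + l.length + 1)).map (fun k : Nat => pvF q r d h need (k : Int))) := by
  intro l
  induction l with
  | nil => intro m; simp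
  | cons x xs ih =>
    intro m
    rw [List.foldl_cons, pvStep d r q h need hd hr0 hrd hneed (m : Int) _ x]
    have hcast : ((m : Int) + 1) = ((m + 1 : Nat) : Int) := by push_cast; ring
    have hrange : (List.range (m + 1)).map (fun k : Nat => pvF q r d h need (k : Int)) ++
        [pvF q r d h need (((m + 1 : Nat)) : Int)]
        = (List.range (m + 1 + 1)).map (fun k : Nat => pvF q r d h need (k : Int)) := by
      conv_rhs => rw [List.range_succ]
      rw [List.map_append]
      simp
    rw [hcast, hrange, ih (m + 1)]
    have harith : m + 1 + xs.length = m + (xs.length + 1) := by omega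
    simp [harith]

-- the two ways of saying "the half-up event fires at k" agree
lemma pvEvent (d h x : Int) (hd : 0 < d) (hh0 : 0 ≤ h) (hhd : h < d) :
    (x % d == h) = ((h - x) % d == 0) := by
  have hsub : (h - x) % d = (h - x % d) % d := by
    rw [Int.sub_emod, Int.emod_eq_of_lt hh0 hhd]
  have hy0 : 0 ≤ x % d := Int.emod_nonneg x (ne_of_gt hd)
  have hyd : x % d < d := Int.emod_lt_of_pos x hd
  rw [hsub, pvEmodSmall d (h - x % d) hd (by omega) (by omega)]
  by_cases hc : x % d = h <;> split_ifs <;> simp_all <;> omega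

-- ===== VERDICT (by name: the statement is the Claim_ definition above) =====
theorem bresenham_sums_py_spec : Claim_equal_bresenham_sums_py := by
  intro num denom half_up _dom hpre
  obtain ⟨hn0, hd1⟩ := hpre
  unfold Spec_bresenham_sums_py
  have hd : (0:Int) < denom := by omega
  have h2 : (0:Int) < 2 := by norm_num
  simp only [bresenham_sums_py, bresenham_sums_py_alt,
    PySem.Int.floordiv_eq_ediv_of_pos hd, PySem.Int.mod_eq_emod_of_pos hd,
    PySem.Int.band_one, PySem.Int.mod_eq_emod_of_pos h2,
    Int.shiftRight_eq_div_pow]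
  norm_num only
  set q := num / denom with hq
  set r := num % denom with hr
  set h := denom / 2 with hh
  set need := (half_up && !(r == 0) && (denom % 2 == 0)) with hneeddef
  have hr0 : 0 ≤ r := Int.emod_nonneg num (ne_of_gt hd)
  have hrd : r < denom := Int.emod_lt_of_pos num hd
  have hdiv2 : 2 * (denom / 2) + denom % 2 = denom := Int.mul_ediv_add_emod denom 2
  have hm2 : 0 ≤ denom % 2 ∧ denom % 2 < 2 :=
    ⟨Int.emod_nonneg denom (by norm_num), Int.emod_lt_of_pos denom h2⟩
  have hh0 : 0 ≤ h := by omega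
  have hhd : h < denom := by omega
  have hneed : need = true → denom = 2 * h ∧ 0 < r := by
    intro ht
    rw [hneeddef] at ht
    simp only [Bool.and_eq_true, beq_iff_eq, Bool.not_eq_true', beq_eq_false_iff_ne] at ht
    exact ⟨by omega, lt_of_le_of_ne hr0 (Ne.symm ht.1.2)⟩
  -- initial state is the closed-form state at 0
  have hpe0 : pvE r denom h 0 = h := by
    show (h - r * 0) % denom = h
    rw [mul_zero, sub_zero]
    exact Int.emod_eq_of_lt hh0 hhd
  have hU0 : (need && (pvE r denom h 0 == 0)) = false := by
    rcases hn : need with _ | _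
    · simp
    · obtain ⟨hdh, hrpos⟩ := hneed hn
      have hz : h ≠ 0 := by omega
      simp [hpe0, hz]
  have hS0 : pvS r denom h 0 = 0 := by
    show (h - r * 0) / denom = 0
    rw [mul_zero, sub_zero]
    exact Int.ediv_eq_zero_of_lt hh0 hhd
  have hP0 : pvF q r denom h need 0 = 0 := by
    rw [pvF_eq q r denom h need 0 hd, hU0, hS0]
    simp
  have hL0 : (List.range 1).map (fun k : Nat => pvF q r denom h need (k : Int))
      = [(0 : Int)] := by
    simp [hP0]
  have hinit : ((h, false, (0:Int), [(0:Int)]) : Int × Bool × Int × List Int)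
      = (pvE r denom h 0, need && (pvE r denom h 0 == 0), pvF q r denom h need 0,
         (List.range 1).map (fun k : Nat => pvF q r denom h need (k : Int))) := by
    rw [hU0, hP0, hL0, hpe0]
  -- the fold ranges
  have hdn : denom = ((denom.toNat : Nat) : Int) := by omega
  have hA : PySem.List.pyRange 0 denom 1
      = (List.range denom.toNat).map (fun k : Nat => (k : Int)) := by
    rw [hdn]; exact PySem.List.pyRange_zero_natCast denom.toNat
  have hB : PySem.List.pyRange 0 (denom + 1) 1
      = (List.range (denom.toNat + 1)).map (fun k : Nat => (k : Int)) := by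
    have heq : denom + 1 = ((denom.toNat + 1 : Nat) : Int) := by omega
    rw [heq]; exact PySem.List.pyRange_zero_natCast (denom.toNat + 1)
  have hloop := pvLoop denom r q h need hd hr0 hrd hneed
      ((List.range denom.toNat).map (fun k : Nat => (k : Int))) 0
  simp only [List.length_map, List.length_range, Nat.cast_zero, zero_add] at hloop
  rw [hA, hB, hinit, hloop]
  simp only [List.map_map]
  apply List.map_congr_left
  intro k _
  simp only [Function.comp, pvF]
  congr 2
  rw [pvEvent denom h (r * (k : Int)) hd hh0 hhd]
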